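-- pv_equiv track=rewrite | github.com/alexbeattie/CHLA | maplocation/locations/management/commands/audit_zip_coverage.py | _format_zip_ranges
-- ===== SOURCE A (Python) =====
-- def _format_zip_ranges(sorted_zips):
--     """Format ZIP codes as ranges for compact display"""
--     if not sorted_zips:
--         return "None"
--
--     ranges = []
--     start = sorted_zips[0]
--     prev = start
--
--     for zip_code in sorted_zips[1:]:
--         if int(zip_code) != int(prev) + 1:
--             # End of range
--             if start == prev:
--                 ranges.append(start)
--             else:
--                 ranges.append(f"{start}-{prev}")
--             start = zip_code
--         prev = zip_code
--
--     # Add last range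
--     if start == prev:
--         ranges.append(start)
--     else:
--         ranges.append(f"{start}-{prev}")
--
--     return ", ".join(ranges)
-- ===== SOURCE B (Python) =====
-- def _format_zip_ranges(sorted_zips):
--     """Format ZIP codes as ranges for compact display"""
--     if not sorted_zips:
--         return "None"
--     # Collapse the list into (first, last) run summaries, scanning right to left:
--     # a zip extends the run to its right when that run's first value is its value + 1.
--     runs = []
--     for z in reversed(sorted_zips):
--         if runs and int(runs[-1][0]) == int(z) + 1:
--             runs[-1] = (z, runs[-1][1])
--         else:
--             runs.append((z, z))
--     return ", ".join(f if f == l else f"{f}-{l}" for f, l in reversed(runs))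
-- ===== Notes on version B (the rewrite author's own statement) =====
-- stated objective: alternative
-- what changed: Replaces A's forward scan threading (ranges, start, prev) accumulators with a right-to-left pass that collapses the list into (first, last) run summaries and then formats them in a separate second pass.
import Mathlib
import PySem

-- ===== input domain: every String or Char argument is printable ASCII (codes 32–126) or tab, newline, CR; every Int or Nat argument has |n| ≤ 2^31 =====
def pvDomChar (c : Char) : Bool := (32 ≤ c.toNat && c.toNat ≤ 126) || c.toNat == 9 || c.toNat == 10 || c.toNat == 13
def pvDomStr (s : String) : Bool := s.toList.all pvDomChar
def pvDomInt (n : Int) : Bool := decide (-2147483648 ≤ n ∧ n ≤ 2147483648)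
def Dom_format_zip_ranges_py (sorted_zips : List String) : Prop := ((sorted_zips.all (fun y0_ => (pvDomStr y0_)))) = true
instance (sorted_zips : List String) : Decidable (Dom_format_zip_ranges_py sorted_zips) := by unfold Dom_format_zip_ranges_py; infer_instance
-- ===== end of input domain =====

-- B replaces A's forward scan with accumulators (ranges, start, prev) by a right-to-left
-- pass building (first, last) run summaries, formatted in a separate second pass.

-- int(s): Python raises ValueError on a non-parsable string; those inputs are outside Pre_,
-- so the default 0 is never observed there.
def fzrVal (s : String) : Int := (PySem.Int.ofStr? s).getD 0

-- ===== PORT A =====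
def fzrLoopA : List String → List String → String → String → List String
  | [], ranges, start, prev =>
      ranges ++ [if start == prev then start else start ++ "-" ++ prev]
  | z :: zs, ranges, start, prev =>
      if fzrVal z ≠ fzrVal prev + 1 then
        fzrLoopA zs (ranges ++ [if start == prev then start else start ++ "-" ++ prev]) z z
      else
        fzrLoopA zs ranges start z

def format_zip_ranges_py (sorted_zips : List String) : String :=
  match sorted_zips with
  | [] => "None"
  | z0 :: rest => PySem.Str.join ", " (fzrLoopA rest [] z0 z0)

-- ===== PORT B =====
-- one step of B's loop: runs[-1] is runs.getLast?; `runs[-1] = (z, runs[-1][1])` is dropLast ++ [...]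
def fzrStepB (runs : List (String × String)) (z : String) : List (String × String) :=
  match runs.getLast? with
  | some fl => if fzrVal fl.1 == fzrVal z + 1 then runs.dropLast ++ [(z, fl.2)]
               else runs ++ [(z, z)]
  | none => runs ++ [(z, z)]

def fzrFmt (fl : String × String) : String :=
  if fl.1 == fl.2 then fl.1 else fl.1 ++ "-" ++ fl.2

def format_zip_ranges_py_alt (sorted_zips : List String) : String :=
  match sorted_zips with
  | [] => "None"
  | _ :: _ =>
      let runs := sorted_zips.reverse.foldl fzrStepB []
      PySem.Str.join ", " (runs.reverse.map fzrFmt)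

-- ===== PRECONDITION & SPEC =====
-- Pre_ excludes exactly the inputs where Python A raises ValueError: a list of length ≥ 2
-- containing a string int() rejects (on a singleton A never calls int and returns it verbatim,
-- and B does the same).
def Pre_format_zip_ranges_py (sorted_zips : List String) : Prop :=
  sorted_zips.length ≤ 1 ∨ ∀ s ∈ sorted_zips, (PySem.Int.ofStr? s).isSome = true
instance (sorted_zips : List String) : Decidable (Pre_format_zip_ranges_py sorted_zips) := by
  unfold Pre_format_zip_ranges_py; infer_instance

def pvWitness_format_zip_ranges_py : List String := ["8", "9", "12"]

def Spec_format_zip_ranges_py (sorted_zips : List String) (out : String) : Prop := out = format_zip_ranges_py_alt sorted_zips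
instance (sorted_zips : List String) (out : String) : Decidable (Spec_format_zip_ranges_py sorted_zips out) := by unfold Spec_format_zip_ranges_py; infer_instance

-- ===== CLAIM (what is proved, stated in full; the proofs are below) =====
def Claim_equal_format_zip_ranges_py : Prop := ∀ (sorted_zips : List String), Dom_format_zip_ranges_py sorted_zips → Pre_format_zip_ranges_py sorted_zips → Spec_format_zip_ranges_py sorted_zips (format_zip_ranges_py sorted_zips)

-- ===== LEMMAS AND PROOFS =====

-- run summaries built front-to-back (proof-side mirror of B's reverse foldl)
def fzrRS : List String → List (String × String)
  | [] => []
  | z :: zs =>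
      match fzrRS zs with
      | [] => [(z, z)]
      | fl :: rest => if fzrVal fl.1 == fzrVal z + 1 then (z, fl.2) :: rest
                      else (z, z) :: fl :: rest

-- the common spec: segments emitted for pending run start..prev followed by zs
def fzrG (start prev : String) : List String → List String
  | [] => [fzrFmt (start, prev)]
  | w :: ws => if fzrVal w ≠ fzrVal prev + 1 then fzrFmt (start, prev) :: fzrG w w ws
               else fzrG start w ws

theorem fzrLoopA_eq_G (zs : List String) : ∀ ranges start prev,
    fzrLoopA zs ranges start prev = ranges ++ fzrG start prev zs := by
  induction zs with
  | nil => intro ranges start prev; simp [fzrLoopA, fzrG, fzrFmt]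
  | cons w ws ih =>
      intro ranges start prev
      simp only [fzrLoopA, fzrG]
      by_cases h : fzrVal w ≠ fzrVal prev + 1
      · simp [h, ih, fzrFmt]
      · simp [h, ih]

theorem fzrFoldB_eq_RS (zs : List String) :
    zs.reverse.foldl fzrStepB [] = (fzrRS zs).reverse := by
  induction zs with
  | nil => rfl
  | cons z zs ih =>
      rw [List.reverse_cons, List.foldl_append, ih]
      simp only [List.foldl_cons, List.foldl_nil, fzrRS]
      cases h : fzrRS zs with
      | nil => simp [fzrStepB]
      | cons fl rest =>
          simp only [List.reverse_cons, fzrStepB, List.getLast?_concat, List.dropLast_concat]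
          by_cases hc : fzrVal fl.1 == fzrVal z + 1
          · simp [hc]
          · simp [hc]

theorem fzrRS_head (z : String) (zs : List String) :
    ∃ l rest, fzrRS (z :: zs) = (z, l) :: rest := by
  simp only [fzrRS]
  cases fzrRS zs with
  | nil => exact ⟨z, [], rfl⟩
  | cons fl rest =>
      by_cases hc : fzrVal fl.1 == fzrVal z + 1
      · exact ⟨fl.2, rest, by simp [hc]⟩
      · exact ⟨z, fl :: rest, by simp [hc]⟩

theorem fzrG_eq_RS (zs : List String) : ∀ start prev l rest,
    fzrRS (prev :: zs) = (prev, l) :: rest →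
    fzrG start prev zs = fzrFmt (start, l) :: rest.map fzrFmt := by
  induction zs with
  | nil =>
      intro start prev l rest h
      simp only [fzrRS] at h
      obtain ⟨rfl, rfl⟩ : l = prev ∧ rest = [] := by
        cases h; exact ⟨rfl, rfl⟩
      simp [fzrG]
  | cons w ws ih =>
      intro start prev l rest h
      obtain ⟨l', rest', hw⟩ := fzrRS_head w ws
      rw [show fzrRS (prev :: w :: ws) = if fzrVal w == fzrVal prev + 1
            then (prev, l') :: rest' else (prev, prev) :: (w, l') :: rest' from by
          simp only [fzrRS] at hw ⊢
          rw [show (match fzrRS ws with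
                | [] => [(w, w)]
                | fl :: rest => if fzrVal fl.1 == fzrVal w + 1 then (w, fl.2) :: rest
                                else (w, w) :: fl :: rest) = (w, l') :: rest' from hw]] at h
      by_cases hc : fzrVal w = fzrVal prev + 1
      · simp only [hc, beq_self_eq_true, if_true] at h
        cases h
        simp only [fzrG, hc, ne_eq, not_true_eq_false, if_false]
        exact ih start w l rest hw
      · rw [if_neg (by simpa using hc)] at h
        cases h
        simp only [fzrG, ne_eq, hc, not_false_eq_true, if_true, List.map_cons]
        rw [ih w w l' rest' hw]

-- ===== VERDICT (by name: the statement is the Claim_ definition above) =====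
theorem format_zip_ranges_py_spec : Claim_equal_format_zip_ranges_py := by
  intro zs _ _
  unfold Spec_format_zip_ranges_py
  cases zs with
  | nil => rfl
  | cons z rest =>
      simp only [format_zip_ranges_py, format_zip_ranges_py_alt]
      rw [fzrLoopA_eq_G, List.nil_append, fzrFoldB_eq_RS, List.reverse_reverse]
      obtain ⟨l, rs, h⟩ := fzrRS_head z rest
      rw [h, List.map_cons, fzrG_eq_RS rest z z l rs h]
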